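-- pv_equiv track=rewrite | github.com/ArthurLorphelin/Exercices-CodinGame | Python/Temperatures/temperatures.py | find_closest_temperature
-- ===== SOURCE A (Python) =====
-- def find_closest_temperature(temperature_list):
--     if not temperature_list:
--         return 0
--
--     temp_closest_to_zero = temperature_list[0]
--     for temp in temperature_list:
--         if (abs(temp) < abs(temp_closest_to_zero)) or (
--                 abs(temp) == abs(temp_closest_to_zero) and temp > temp_closest_to_zero):
--             temp_closest_to_zero = temp
--
--     return temp_closest_to_zero
-- ===== SOURCE B (Python) =====
-- def find_closest_temperature(temperature_list):
--     if not temperature_list: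
--         return 0
--     return sorted(temperature_list, key=lambda t: (abs(t), -t))[0]
-- ===== Notes on version B (the rewrite author's own statement) =====
-- stated objective: alternative
-- what changed: Replaces A's single-pass running-best loop by a stable sort under the key (abs(t), -t) followed by taking the first element; the lexicographic key encodes both the distance-to-zero criterion and the positive-wins tie-break.
import Mathlib
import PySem

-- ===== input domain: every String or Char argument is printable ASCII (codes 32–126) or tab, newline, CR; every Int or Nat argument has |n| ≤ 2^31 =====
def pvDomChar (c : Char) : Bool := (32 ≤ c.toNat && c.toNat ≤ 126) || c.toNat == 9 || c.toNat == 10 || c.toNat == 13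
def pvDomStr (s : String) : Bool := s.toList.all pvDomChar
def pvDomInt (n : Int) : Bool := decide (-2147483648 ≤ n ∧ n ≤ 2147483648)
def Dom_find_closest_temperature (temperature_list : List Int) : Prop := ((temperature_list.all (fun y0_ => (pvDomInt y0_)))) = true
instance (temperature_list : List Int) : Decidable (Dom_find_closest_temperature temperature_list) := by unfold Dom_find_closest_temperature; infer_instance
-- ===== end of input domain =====

-- ===== PORT A =====
-- literal transliteration of A: guard empty, then a running-best fold over the list
def find_closest_temperature (temperature_list : List Int) : Int :=
  match temperature_list with
  | [] => 0
  | t0 :: _ =>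
    temperature_list.foldl
      (fun temp_closest_to_zero temp =>
        if |temp| < |temp_closest_to_zero| ∨
            (|temp| = |temp_closest_to_zero| ∧ temp > temp_closest_to_zero) then
          temp
        else temp_closest_to_zero) t0

-- ===== PORT B =====
-- literal transliteration of B: guard empty, then sorted(xs, key=lambda t: (abs(t), -t))[0]
-- (the [0] is taken with headD; the guard makes the sorted list nonempty, as in Source B)
def find_closest_temperature_alt (temperature_list : List Int) : Int :=
  if temperature_list = [] then 0
  else (PySem.List.sorted2 temperature_list (fun t => |t|) (fun t => -t)).headD 0

-- ===== PRECONDITION & SPEC =====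
def Spec_find_closest_temperature (temperature_list : List Int) (out : Int) : Prop := out = find_closest_temperature_alt temperature_list
instance (temperature_list : List Int) (out : Int) : Decidable (Spec_find_closest_temperature temperature_list out) := by unfold Spec_find_closest_temperature; infer_instance

-- ===== CLAIM (what is proved, stated in full; the proofs are below) =====
def Claim_equal_find_closest_temperature : Prop := ∀ (temperature_list : List Int), Dom_find_closest_temperature temperature_list → Spec_find_closest_temperature temperature_list (find_closest_temperature temperature_list)

-- ===== LEMMAS AND PROOFS =====

-- B's sort key, packaged as a single lexicographically ordered value
def pvKey (t : Int) : Int ×ₗ Int := toLex (|t|, -t)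

lemma pvKey_inj {a b : Int} (h : pvKey a = pvKey b) : a = b := by
  have := congrArg (fun p => (ofLex p).2) h
  simpa [pvKey] using this

lemma pvKey_lt_iff {a b : Int} :
    pvKey a < pvKey b ↔ (|a| < |b| ∨ (|a| = |b| ∧ a > b)) := by
  simp [pvKey, Prod.Lex.toLex_lt_toLex]

-- B's two-component sort is the sort under the single lexicographic key pvKey
lemma sorted2_eq_sorted_key (xs : List Int) :
    PySem.List.sorted2 xs (fun t => |t|) (fun t => -t)
      = PySem.List.sorted xs pvKey := by
  simp only [PySem.List.sorted2, PySem.List.sorted]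
  congr 1
  funext acc x
  congr 1
  funext a b
  rcases lt_trichotomy (|a| : Int) |b| with h | h | h
  · simp [pvKey, Prod.Lex.toLex_lt_toLex, h]
  · simp [pvKey, Prod.Lex.toLex_lt_toLex, h]
  · simp [pvKey, Prod.Lex.toLex_lt_toLex, asymm h, h.ne']
    exact fun hle => absurd hle (not_le.mpr h)

-- A's fold returns a member of b :: xs whose key is minimal there
lemma foldA_min (xs : List Int) (b : Int) :
    (xs.foldl
        (fun best temp =>
          if |temp| < |best| ∨ (|temp| = |best| ∧ temp > best) then temp else best) b)
        ∈ b :: xs ∧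
      ∀ y ∈ b :: xs,
        pvKey (xs.foldl
          (fun best temp =>
            if |temp| < |best| ∨ (|temp| = |best| ∧ temp > best) then temp else best) b) ≤ pvKey y := by
  induction xs generalizing b with
  | nil => simp
  | cons x xs ih =>
    simp only [List.foldl_cons]
    by_cases h : |x| < |b| ∨ (|x| = |b| ∧ x > b)
    · rw [if_pos h]
      rcases ih x with ⟨hmem, hmin⟩
      refine ⟨?_, ?_⟩
      · rcases List.mem_cons.mp hmem with h1 | h1 <;> simp [h1]
      · intro y hy
        rcases List.mem_cons.mp hy with rfl | hy
        · exact (hmin x (List.mem_cons_self ..)).trans (le_of_lt (pvKey_lt_iff.mpr h))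
        · exact hmin y hy
    · rw [if_neg h]
      rcases ih b with ⟨hmem, hmin⟩
      refine ⟨?_, ?_⟩
      · rcases List.mem_cons.mp hmem with h1 | h1 <;> simp [h1]
      · intro y hy
        rcases List.mem_cons.mp hy with rfl | hy
        · exact hmin y (List.mem_cons_self ..)
        · rcases List.mem_cons.mp hy with rfl | hy
          · exact (hmin b (List.mem_cons_self ..)).trans
              (le_of_not_gt fun hc => h (pvKey_lt_iff.mp hc))
          · exact hmin y (List.mem_cons_of_mem _ hy)

-- ===== VERDICT (by name: the statement is the Claim_ definition above) =====
theorem find_closest_temperature_spec : Claim_equal_find_closest_temperature := by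
  intro xs _
  unfold Spec_find_closest_temperature find_closest_temperature_alt
  cases xs with
  | nil => rfl
  | cons t0 rest =>
    have hred : find_closest_temperature (t0 :: rest)
        = (t0 :: rest).foldl (fun best temp =>
            if |temp| < |best| ∨ (|temp| = |best| ∧ temp > best) then temp else best) t0 := rfl
    rw [hred, if_neg (List.cons_ne_nil t0 rest), sorted2_eq_sorted_key]
    obtain ⟨m, t, hs⟩ : ∃ m t, PySem.List.sorted (t0 :: rest) pvKey = m :: t := by
      cases hsort : PySem.List.sorted (t0 :: rest) pvKey with
      | nil => exact absurd ((PySem.List.sorted_eq_nil_iff _ _ _).mp hsort) (by simp)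
      | cons m t => exact ⟨m, t, rfl⟩
    rw [hs]
    have hm : m ∈ t0 :: rest :=
      (PySem.List.sorted_perm (t0 :: rest) pvKey false).mem_iff.mp
        (hs ▸ List.mem_cons_self ..)
    have hmle : ∀ y ∈ t0 :: rest, pvKey m ≤ pvKey y :=
      PySem.List.key_head_sorted_le _ _ hs
    obtain ⟨hAmem, hAmin⟩ := foldA_min (t0 :: rest) t0
    refine pvKey_inj (le_antisymm (hAmin m (List.mem_cons_of_mem _ hm)) (hmle _ ?_))
    rcases List.mem_cons.mp hAmem with h1 | h1
    · rw [h1]; exact List.mem_cons_self ..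
    · exact h1
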